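-- pv_equiv track=rewrite | github.com/arifkhan1990/Competitive-Programming | Codingninjas/Sorting/Sort-By-Kth-Bit.py | sortArrayByKBit
-- ===== SOURCE A (Python) =====
-- def sortArrayByKBit(n, k, arr):
--     ans1= []
--     ans2= []
--     k  -= 1
--
--     for x in arr:
--         if x & (1<<k):
--             ans1.append(x)
--         else:
--             ans2.append(x)
--     return ans2 + ans1
-- ===== SOURCE B (Python) =====
-- def sortArrayByKBit(n, k, arr):
--     mask = 1 << (k - 1)
--     return sorted(arr, key=lambda x: (x & mask) != 0)
-- ===== Notes on version B (the rewrite author's own statement) =====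
-- stated objective: idiomatic
-- what changed: Replaces the two-accumulator partition-and-concatenate loop with a single stable sort keyed on whether the k-th bit is set (False sorts before True, stability preserves relative order).
-- outside the precondition, e.g. on sortArrayByKBit(0, 0, []): A returns [], B raises ValueError
import Mathlib
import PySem

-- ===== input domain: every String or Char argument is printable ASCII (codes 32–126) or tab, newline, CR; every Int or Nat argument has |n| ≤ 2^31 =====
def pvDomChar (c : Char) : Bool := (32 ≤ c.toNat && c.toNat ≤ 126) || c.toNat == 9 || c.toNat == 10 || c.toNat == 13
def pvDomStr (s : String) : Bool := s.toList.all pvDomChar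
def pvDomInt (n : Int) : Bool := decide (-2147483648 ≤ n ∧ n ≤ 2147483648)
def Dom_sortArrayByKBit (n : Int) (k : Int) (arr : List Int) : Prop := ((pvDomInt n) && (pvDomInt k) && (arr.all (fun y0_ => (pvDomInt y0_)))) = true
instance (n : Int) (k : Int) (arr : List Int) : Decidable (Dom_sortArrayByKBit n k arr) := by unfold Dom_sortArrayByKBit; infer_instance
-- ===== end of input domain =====

-- B replaces A's two-accumulator partition-and-concatenate with one stable sort keyed on the k-th bit (idiomatic; same result, proved below).


-- ===== PORT A =====
-- one pass, two accumulators (ans1 = bit set, ans2 = bit clear), then ans2 + ans1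
def sortArrayByKBit (n : Int) (k : Int) (arr : List Int) : List Int :=
  let k' := k - 1
  let p := arr.foldl (fun (acc : List Int × List Int) x =>
    if PySem.Int.band x ((1 : Int) <<< k'.toNat) ≠ 0 then (acc.1 ++ [x], acc.2)
    else (acc.1, acc.2 ++ [x])) ([], [])
  p.2 ++ p.1

-- ===== PORT B =====
-- stable sort by the boolean "k-th bit set" key (False before True)
def sortArrayByKBit_alt (n : Int) (k : Int) (arr : List Int) : List Int :=
  let mask := (1 : Int) <<< (k - 1).toNat
  PySem.List.sorted arr (fun x => decide (PySem.Int.band x mask ≠ 0))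

-- ===== PRECONDITION & SPEC =====
-- Pre_ excludes k ≤ 0: there Python's 1 << (k-1) raises ValueError (negative shift count) on any nonempty arr, and B raises it even on empty arr, where A's loop never reaches the shift and accidentally returns [].
def Pre_sortArrayByKBit (n : Int) (k : Int) (arr : List Int) : Prop := 1 ≤ k
instance (n : Int) (k : Int) (arr : List Int) : Decidable (Pre_sortArrayByKBit n k arr) := by unfold Pre_sortArrayByKBit; infer_instance
def pvWitness_sortArrayByKBit : Int × Int × List Int := (3, 2, [5, 2, 7, 0, -3])

def Spec_sortArrayByKBit (n : Int) (k : Int) (arr : List Int) (out : List Int) : Prop := out = sortArrayByKBit_alt n k arr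
instance (n : Int) (k : Int) (arr : List Int) (out : List Int) : Decidable (Spec_sortArrayByKBit n k arr out) := by unfold Spec_sortArrayByKBit; infer_instance

-- ===== CLAIM (what is proved, stated in full; the proofs are below) =====
def Claim_equal_sortArrayByKBit : Prop := ∀ (n : Int) (k : Int) (arr : List Int), Dom_sortArrayByKBit n k arr → Pre_sortArrayByKBit n k arr → Spec_sortArrayByKBit n k arr (sortArrayByKBit n k arr)

-- ===== LEMMAS AND PROOFS =====

-- unfolding equation for insertBy on a cons
theorem insertBy_cons {α : Type} (before : α → α → Bool) (x y : α) (ys : List α) :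
    PySem.List.insertBy before x (y :: ys) = if before x y then x :: y :: ys else y :: PySem.List.insertBy before x ys := rfl

-- insertBy skips a prefix it never wants to insert before
theorem insertBy_skip {α : Type} (before : α → α → Bool) (x : α) (zs rest : List α)
    (h : ∀ z ∈ zs, before x z = false) :
    PySem.List.insertBy before x (zs ++ rest) = zs ++ PySem.List.insertBy before x rest := by
  induction zs with
  | nil => simp
  | cons z zs ih =>
    have hz : before x z = false := h z (by simp)
    rw [List.cons_append, insertBy_cons, hz]
    simp [ih (fun a ha => h a (by simp [ha]))]

-- inserting a false-key element into an all-true-key list puts it in front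
theorem insertBy_all_true (P : Int → Bool) (x : Int) (os : List Int)
    (hx : P x = false) (h : ∀ o ∈ os, P o = true) :
    PySem.List.insertBy (fun a b => decide (P a < P b)) x os = x :: os := by
  cases os with
  | nil => rfl
  | cons o os =>
    have ho : P o = true := h o (by simp)
    rw [insertBy_cons]
    simp [hx, ho]

-- the stable-insertion-sort loop with a boolean key keeps falses before trues in input order
theorem sorted_bool_loop (P : Int → Bool) (xs : List Int) : ∀ (zs os : List Int),
    (∀ z ∈ zs, P z = false) → (∀ o ∈ os, P o = true) →
    xs.foldl (fun acc x => PySem.List.insertBy (fun a b => decide (P a < P b)) x acc) (zs ++ os)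
      = (zs ++ xs.filter (fun x => !P x)) ++ (os ++ xs.filter P) := by
  induction xs with
  | nil => intro zs os _ _; simp
  | cons x xs ih =>
    intro zs os hz ho
    by_cases hP : P x = true
    · have h1 : PySem.List.insertBy (fun a b => decide (P a < P b)) x (zs ++ os) = (zs ++ os) ++ [x] := by
        apply PySem.List.insertBy_of_forall_not_before
        intro y _; simp [hP]
      have h2 := ih zs (os ++ [x]) hz (by intro o hoo; rcases List.mem_append.mp hoo with h | h
                                          · exact ho o h
                                          · simp at h; simpa [h] using hP)
      simp only [List.foldl_cons, h1, List.append_assoc] at *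
      rw [h2]
      simp [List.filter_cons, hP]
    · have hPf : P x = false := by simpa using hP
      have h1 : PySem.List.insertBy (fun a b => decide (P a < P b)) x (zs ++ os) = zs ++ (x :: os) := by
        rw [insertBy_skip _ _ _ _ (by intro z hzz; simp [hz z hzz, hPf])]
        rw [insertBy_all_true P x os hPf ho]
      have h2 := ih (zs ++ [x]) os (by intro z hzz; rcases List.mem_append.mp hzz with h | h
                                       · exact hz z h
                                       · simp at h; simpa [h] using hPf) ho
      simp only [List.foldl_cons, h1]
      have : zs ++ (x :: os) = (zs ++ [x]) ++ os := by simp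
      rw [this, h2]
      simp [List.filter_cons, hPf]

-- A's partition loop collects the two filters
theorem partition_loop (P : Int → Bool) (xs : List Int) : ∀ (a1 a2 : List Int),
    xs.foldl (fun (acc : List Int × List Int) x =>
      if P x then (acc.1 ++ [x], acc.2) else (acc.1, acc.2 ++ [x])) (a1, a2)
      = (a1 ++ xs.filter P, a2 ++ xs.filter (fun x => !P x)) := by
  induction xs with
  | nil => intro a1 a2; simp
  | cons x xs ih =>
    intro a1 a2
    by_cases hP : P x = true
    · simp [List.filter_cons, hP, ih]
    · have hPf : P x = false := by simpa using hP
      simp [List.filter_cons, hPf, ih]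

-- ===== VERDICT (by name: the statement is the Claim_ definition above) =====
theorem sortArrayByKBit_spec : Claim_equal_sortArrayByKBit := by
  intro n k arr _ _
  unfold Spec_sortArrayByKBit sortArrayByKBit sortArrayByKBit_alt
  simp only []
  rw [PySem.List.sorted_eq_foldl_insertBy]
  have hB := sorted_bool_loop (fun x => decide (PySem.Int.band x ((1 : Int) <<< (k - 1).toNat) ≠ 0)) arr [] [] (by simp) (by simp)
  have hA := partition_loop (fun x => decide (PySem.Int.band x ((1 : Int) <<< (k - 1).toNat) ≠ 0)) arr [] []
  simp only [List.nil_append, List.append_nil] at hB hA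
  simp only [decide_eq_true_eq] at hA ⊢
  rw [hA]
  simpa using hB.symm
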